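-- pv_equiv track=rewrite | github.com/DeanHe/Practice | LeetCodePython/MaximumScoreUsingExactlyKPairs.py | maxScoreTopDownDP
-- ===== SOURCE A (Python) =====
-- from typing import List
--
-- def maxScoreTopDownDP(nums1: List[int], nums2: List[int], k: int) -> int:
--     NEG = -10**18
--     dp = [[[NEG] * (k + 1) for _ in range(len(nums2) + 1)] for _ in range(len(nums1) + 1)]
--     dp[0][0][0] = 0
--     for i in range(len(nums1) + 1):
--         for j in range(len(nums2) + 1):
--             for kk in range(k + 1):
--                 if i > 0:
--                     dp[i][j][kk] = max(dp[i][j][kk], dp[i - 1][j][kk])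
--                 if j > 0:
--                     dp[i][j][kk] = max(dp[i][j][kk], dp[i][j - 1][kk])
--                 if i > 0 and j > 0 and kk > 0 and dp[i - 1][j - 1][kk - 1] != NEG:
--                     dp[i][j][kk] = max(dp[i][j][kk], dp[i - 1][j - 1][kk - 1] + nums1[i - 1] * nums2[j - 1])
--     return dp[len(nums1)][len(nums2)][k]
-- ===== SOURCE B (Python) =====
-- from typing import List
--
-- def maxScoreTopDownDP(nums1: List[int], nums2: List[int], k: int) -> int:
--     NEG = -10**18
--     memo = {}
--     def f(i, j, kk):
--         key = (i, j, kk)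
--         if key in memo:
--             return memo[key]
--         if i == 0 and j == 0:
--             res = 0 if kk == 0 else NEG
--         else:
--             res = NEG
--             if i > 0:
--                 res = max(res, f(i - 1, j, kk))
--             if j > 0:
--                 res = max(res, f(i, j - 1, kk))
--             if i > 0 and j > 0 and kk > 0:
--                 prev = f(i - 1, j - 1, kk - 1)
--                 if prev != NEG:
--                     res = max(res, prev + nums1[i - 1] * nums2[j - 1])
--         memo[key] = res
--         return res
--     return f(len(nums1), len(nums2), k)
-- ===== Notes on version B (the rewrite author's own statement) =====
-- stated objective: alternative
-- what changed: Replaced the bottom-up triple-loop DP that fills the whole (n1+1)x(n2+1)x(k+1) table by a top-down memoized recursion f(i,j,kk) that only evaluates states actually reachable from (len(nums1),len(nums2),k).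
import Mathlib
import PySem

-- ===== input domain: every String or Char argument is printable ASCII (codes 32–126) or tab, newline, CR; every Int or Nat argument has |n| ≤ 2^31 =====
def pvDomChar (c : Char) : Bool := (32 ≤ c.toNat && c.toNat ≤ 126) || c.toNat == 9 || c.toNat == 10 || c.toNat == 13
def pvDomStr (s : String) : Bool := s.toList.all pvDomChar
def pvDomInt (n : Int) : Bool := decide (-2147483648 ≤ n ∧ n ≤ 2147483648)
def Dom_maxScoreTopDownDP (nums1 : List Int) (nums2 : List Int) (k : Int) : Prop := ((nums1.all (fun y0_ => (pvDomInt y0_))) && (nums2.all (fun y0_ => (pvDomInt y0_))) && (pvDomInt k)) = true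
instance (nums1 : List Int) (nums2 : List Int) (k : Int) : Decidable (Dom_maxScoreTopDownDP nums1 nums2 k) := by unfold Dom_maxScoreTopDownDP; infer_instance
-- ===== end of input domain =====

-- B replaces A's full bottom-up 3-dimensional DP sweep by a top-down memoized recursion
-- that only visits reachable states (objective: alternative decomposition).

-- ===== PORT A =====
def pvNEG : Int := -(10:Int)^18

-- one execution of A's inner loop body: the final value of dp[i][j][kk], reading the
-- table through t (the cell is read at its initial value and each candidate is max-ed in,
-- in A's order; list reads nums1[i-1]/nums2[j-1] are guarded by 0 < i / 0 < j and
-- i ≤ len / j ≤ len, so getD is exact)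
def pvCell (nums1 nums2 : List Int) (t : Nat → Nat → Nat → Int) (i j kk : Nat) : Int :=
  let v0 := t i j kk
  let v1 := if 0 < i then max v0 (t (i-1) j kk) else v0
  let v2 := if 0 < j then max v1 (t i (j-1) kk) else v1
  if 0 < i ∧ 0 < j ∧ 0 < kk ∧ t (i-1) (j-1) (kk-1) ≠ pvNEG then
    max v2 (t (i-1) (j-1) (kk-1) + nums1.getD (i-1) 0 * nums2.getD (j-1) 0)
  else v2

-- dp[a][b][c] on the 3-d list (every index A reads or writes is in range, so getD is exact)
def pvGet3 (dp : List (List (List Int))) (a b c : Nat) : Int :=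
  ((dp.getD a []).getD b []).getD c 0

-- dp[a][b][c] = v on the 3-d list
def pvSet3 (dp : List (List (List Int))) (a b c : Nat) (v : Int) : List (List (List Int)) :=
  dp.set a ((dp.getD a []).set b (((dp.getD a []).getD b []).set c v))

def maxScoreTopDownDP (nums1 : List Int) (nums2 : List Int) (k : Int) : Int :=
  let n1 := nums1.length
  let n2 := nums2.length
  let kn := k.toNat   -- Python raises IndexError for k < 0 (excluded by Pre_); range(k+1) = 0..k
  let dp0 := List.replicate (n1+1) (List.replicate (n2+1) (List.replicate (kn+1) pvNEG))
  let dp1 := pvSet3 dp0 0 0 0 0   -- dp[0][0][0] = 0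
  let final := (List.range (n1+1)).foldl (fun dp i =>
      (List.range (n2+1)).foldl (fun dp j =>
        (List.range (kn+1)).foldl (fun dp kk =>
          pvSet3 dp i j kk (pvCell nums1 nums2 (pvGet3 dp) i j kk)) dp) dp) dp1
  pvGet3 final n1 n2 kn

-- ===== PORT B =====
-- B's recursive helper f with its memo dict threaded through (Python mutates `memo` in
-- place; here the dict is passed and returned), following Source B line by line
def pvF (nums1 nums2 : List Int) (i j : Nat) (kk : Int)
    (memo : PySem.Dict (Nat × Nat × Int) Int) : PySem.Dict (Nat × Nat × Int) Int × Int :=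
  match PySem.Dict.get? memo (i, j, kk) with
  | some v => (memo, v)
  | none =>
    let r :=
      if i = 0 ∧ j = 0 then (memo, if kk = 0 then (0:Int) else pvNEG)
      else
        let res0 := pvNEG
        let q1 :=
          if h1 : 0 < i then
            let p := pvF nums1 nums2 (i-1) j kk memo
            (p.1, max res0 p.2)
          else (memo, res0)
        let q2 :=
          if h2 : 0 < j then
            let p := pvF nums1 nums2 i (j-1) kk q1.1
            (p.1, max q1.2 p.2)
          else q1
        if h3 : 0 < i ∧ 0 < j ∧ 0 < kk then
          let p := pvF nums1 nums2 (i-1) (j-1) (kk-1) q2.1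
          if p.2 ≠ pvNEG then
            (p.1, max q2.2 (p.2 + nums1.getD (i-1) 0 * nums2.getD (j-1) 0))
          else (p.1, q2.2)
        else q2
    (PySem.Dict.insert r.1 (i, j, kk) r.2, r.2)
termination_by i + j
decreasing_by all_goals omega

def maxScoreTopDownDP_alt (nums1 : List Int) (nums2 : List Int) (k : Int) : Int :=
  (pvF nums1 nums2 nums1.length nums2.length k PySem.Dict.empty).2

-- ===== PRECONDITION & SPEC =====
-- Pre_ excludes exactly k < 0, where Python A raises IndexError (dp[0][0][0] = 0 on an empty inner list)
def Pre_maxScoreTopDownDP (nums1 : List Int) (nums2 : List Int) (k : Int) : Prop := 0 ≤ k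
instance (nums1 : List Int) (nums2 : List Int) (k : Int) : Decidable (Pre_maxScoreTopDownDP nums1 nums2 k) := by unfold Pre_maxScoreTopDownDP; infer_instance

def pvWitness_maxScoreTopDownDP : List Int × List Int × Int := ([1, 2], [3, -4], 1)

def Spec_maxScoreTopDownDP (nums1 : List Int) (nums2 : List Int) (k : Int) (out : Int) : Prop := out = maxScoreTopDownDP_alt nums1 nums2 k
instance (nums1 : List Int) (nums2 : List Int) (k : Int) (out : Int) : Decidable (Spec_maxScoreTopDownDP nums1 nums2 k out) := by unfold Spec_maxScoreTopDownDP; infer_instance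

-- ===== CLAIM (what is proved, stated in full; the proofs are below) =====
def Claim_equal_maxScoreTopDownDP : Prop := ∀ (nums1 : List Int) (nums2 : List Int) (k : Int), Dom_maxScoreTopDownDP nums1 nums2 k → Pre_maxScoreTopDownDP nums1 nums2 k → Spec_maxScoreTopDownDP nums1 nums2 k (maxScoreTopDownDP nums1 nums2 k)
-- ===== LEMMAS AND PROOFS =====
def pvG (nums1 nums2 : List Int) (i j : Nat) (kk : Int) : Int :=
  if i = 0 ∧ j = 0 then (if kk = 0 then 0 else pvNEG)
  else
    let r0 := pvNEG
    let r1 := if h1 : 0 < i then max r0 (pvG nums1 nums2 (i-1) j kk) else r0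
    let r2 := if h2 : 0 < j then max r1 (pvG nums1 nums2 i (j-1) kk) else r1
    if h3 : 0 < i ∧ 0 < j ∧ 0 < kk then
      let p := pvG nums1 nums2 (i-1) (j-1) (kk-1)
      if p ≠ pvNEG then max r2 (p + nums1.getD (i-1) 0 * nums2.getD (j-1) 0) else r2
    else r2
termination_by i + j
decreasing_by all_goals omega

def pvCoh (nums1 nums2 : List Int) (memo : PySem.Dict (Nat × Nat × Int) Int) : Prop :=
  ∀ i j kk v, PySem.Dict.get? memo (i, j, kk) = some v → v = pvG nums1 nums2 i j kk

theorem pvF_correct (nums1 nums2 : List Int) : ∀ (N i j : Nat), i + j = N → ∀ (kk : Int)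
    (memo : PySem.Dict (Nat × Nat × Int) Int), pvCoh nums1 nums2 memo →
    ((pvF nums1 nums2 i j kk memo).2 = pvG nums1 nums2 i j kk ∧
    pvCoh nums1 nums2 (pvF nums1 nums2 i j kk memo).1) := by
  intro N
  induction N using Nat.strong_induction_on with
  | _ N IH =>
  intro i j hN kk memo h
  rw [pvF.eq_def]
  cases hg : PySem.Dict.get? memo (i, j, kk) with
  | some v => exact ⟨h i j kk v hg, h⟩
  | none =>
    dsimp only
    by_cases h01 : i = 0 ∧ j = 0
    · rw [if_pos h01]
      dsimp only
      refine ⟨by rw [pvG, if_pos h01], ?_⟩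
      intro a b c v hv
      rw [PySem.Dict.get?_insert] at hv
      split at hv
      · next heq =>
        rw [Prod.mk.injEq, Prod.mk.injEq] at heq
        obtain ⟨ha, hb, hc⟩ := heq
        subst ha; subst hb; subst hc
        rw [pvG, if_pos h01]
        exact (Option.some.injEq .. ▸ hv).symm
      · exact h a b c v hv
    · rw [if_neg h01]
      set q1 : PySem.Dict (Nat × Nat × Int) Int × Int :=
        (if h1 : 0 < i then ((pvF nums1 nums2 (i - 1) j kk memo).1, max pvNEG (pvF nums1 nums2 (i - 1) j kk memo).2) else (memo, pvNEG)) with hq1def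
      set q2 : PySem.Dict (Nat × Nat × Int) Int × Int :=
        (if h2 : 0 < j then ((pvF nums1 nums2 i (j - 1) kk q1.1).1, max q1.2 (pvF nums1 nums2 i (j - 1) kk q1.1).2) else q1) with hq2def
      set q3 : PySem.Dict (Nat × Nat × Int) Int × Int :=
        (if h3 : 0 < i ∧ 0 < j ∧ 0 < kk then
          (if (pvF nums1 nums2 (i - 1) (j - 1) (kk - 1) q2.1).2 ≠ pvNEG then
            ((pvF nums1 nums2 (i - 1) (j - 1) (kk - 1) q2.1).1,
              max q2.2 ((pvF nums1 nums2 (i - 1) (j - 1) (kk - 1) q2.1).2 + nums1.getD (i - 1) 0 * nums2.getD (j - 1) 0))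
          else ((pvF nums1 nums2 (i - 1) (j - 1) (kk - 1) q2.1).1, q2.2))
        else q2) with hq3def
      have h1q : pvCoh nums1 nums2 q1.1 ∧ q1.2 = (if h1 : 0 < i then max pvNEG (pvG nums1 nums2 (i-1) j kk) else pvNEG) := by
        by_cases h1 : 0 < i
        · have hih := IH (i - 1 + j) (by omega) (i-1) j rfl kk memo h
          rw [hq1def, dif_pos h1, dif_pos h1]
          exact ⟨hih.2, by rw [hih.1]⟩
        · rw [hq1def, dif_neg h1, dif_neg h1]
          exact ⟨h, rfl⟩
      have h2q : pvCoh nums1 nums2 q2.1 ∧ q2.2 = (if h2 : 0 < j then max q1.2 (pvG nums1 nums2 i (j-1) kk) else q1.2) := by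
        by_cases h2 : 0 < j
        · have hih := IH (i + (j-1)) (by omega) i (j-1) rfl kk q1.1 h1q.1
          rw [hq2def, dif_pos h2, dif_pos h2]
          exact ⟨hih.2, by rw [hih.1]⟩
        · rw [hq2def, dif_neg h2, dif_neg h2]
          exact ⟨h1q.1, rfl⟩
      have h3q : pvCoh nums1 nums2 q3.1 ∧ q3.2 = (if h3 : 0 < i ∧ 0 < j ∧ 0 < kk then (if pvG nums1 nums2 (i-1) (j-1) (kk-1) ≠ pvNEG then max q2.2 (pvG nums1 nums2 (i-1) (j-1) (kk-1) + nums1.getD (i-1) 0 * nums2.getD (j-1) 0) else q2.2) else q2.2) := by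
        by_cases h3 : 0 < i ∧ 0 < j ∧ 0 < kk
        · have hih := IH ((i-1) + (j-1)) (by omega) (i-1) (j-1) rfl (kk-1) q2.1 h2q.1
          rw [hq3def, dif_pos h3, dif_pos h3, hih.1]
          by_cases hne : pvG nums1 nums2 (i-1) (j-1) (kk-1) ≠ pvNEG
          · rw [if_pos hne, if_pos hne]
            exact ⟨hih.2, rfl⟩
          · rw [if_neg hne, if_neg hne]
            exact ⟨hih.2, rfl⟩
        · rw [hq3def, dif_neg h3, dif_neg h3]
          exact ⟨h2q.1, rfl⟩
      have hval : q3.2 = pvG nums1 nums2 i j kk := by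
        rw [h3q.2, h2q.2, h1q.2]
        conv_rhs => rw [pvG]
        rw [if_neg h01]
      refine ⟨hval, ?_⟩
      intro a b c v hv
      rw [PySem.Dict.get?_insert] at hv
      split at hv
      · next heq =>
        rw [Prod.mk.injEq, Prod.mk.injEq] at heq
        obtain ⟨ha, hb, hc⟩ := heq
        subst ha; subst hb; subst hc
        rw [← hval]
        exact (Option.some.injEq .. ▸ hv).symm
      · exact h3q.1 a b c v hv

abbrev pvLt (a b c i j kk : Nat) : Prop :=
  a < i ∨ (a = i ∧ (b < j ∨ (b = j ∧ c < kk)))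

def pvInit : Nat → Nat → Nat → Int := fun a b c => if a = 0 ∧ b = 0 ∧ c = 0 then 0 else pvNEG

-- a point update of a function-valued table (proof-side abstraction of pvSet3)
def pvWrite (t : Nat → Nat → Nat → Int) (i j kk : Nat) (v : Int) : Nat → Nat → Nat → Int :=
  fun a b c => if a = i ∧ b = j ∧ c = kk then v else t a b c

def pvGood (nums1 nums2 : List Int) (n1 n2 kn : Nat) (t : Nat → Nat → Nat → Int) (i j kk : Nat) : Prop :=
  ∀ a b c, a ≤ n1 → b ≤ n2 → c ≤ kn →
    t a b c = if pvLt a b c i j kk then pvG nums1 nums2 a b (c : Int) else pvInit a b c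

theorem pvStep (nums1 nums2 : List Int) (n1 n2 kn : Nat) (t : Nat → Nat → Nat → Int)
    (i j kk : Nat) (hi : i ≤ n1) (hj : j ≤ n2) (hk : kk ≤ kn)
    (hg : pvGood nums1 nums2 n1 n2 kn t i j kk) :
    pvGood nums1 nums2 n1 n2 kn (pvWrite t i j kk (pvCell nums1 nums2 t i j kk)) i j (kk+1) := by
  intro a b c ha hb hc
  unfold pvWrite
  by_cases key : a = i ∧ b = j ∧ c = kk
  · obtain ⟨ka, kb, kc⟩ := key
    subst ka; subst kb; subst kc
    rw [if_pos ⟨rfl, rfl, rfl⟩, if_pos (by unfold pvLt; omega)]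
    -- evaluate the cell against one unfolding of pvG
    have hv0 : t a b c = pvInit a b c := by
      rw [hg a b c ha hb hc, if_neg (by unfold pvLt; omega)]
    have hv1 : 0 < a → t (a-1) b c = pvG nums1 nums2 (a-1) b (c : Int) := by
      intro h1
      rw [hg (a-1) b c (by omega) hb hc, if_pos (by unfold pvLt; omega)]
    have hv2 : 0 < b → t a (b-1) c = pvG nums1 nums2 a (b-1) (c : Int) := by
      intro h2
      rw [hg a (b-1) c ha (by omega) hc, if_pos (by unfold pvLt; omega)]
    have hv3 : 0 < a → t (a-1) (b-1) (c-1) = pvG nums1 nums2 (a-1) (b-1) ((c-1 : Nat) : Int) := by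
      intro h1
      rw [hg (a-1) (b-1) (c-1) (by omega) (by omega) (by omega), if_pos (by unfold pvLt; omega)]
    unfold pvCell
    dsimp only
    by_cases h01 : a = 0 ∧ b = 0
    · obtain ⟨ha0, hb0⟩ := h01
      subst ha0; subst hb0
      rw [pvG, hv0]
      by_cases hc0 : c = 0 <;> simp [pvInit, hc0, lt_self_iff_false]
    · conv_rhs => rw [pvG]
      rw [if_neg h01]
      have hinit : pvInit a b c = pvNEG := by unfold pvInit; rw [if_neg (by omega)]
      rw [hv0, hinit]
      dsimp only
      by_cases h1 : 0 < a <;> by_cases h2 : 0 < b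
      · -- 0 < a, 0 < b
        rw [if_pos h1, if_pos h2, hv1 h1, hv2 h2, dif_pos h1, dif_pos h2]
        by_cases h3 : 0 < c
        · rw [hv3 h1, show ((c - 1 : Nat) : Int) = (c : Int) - 1 from by omega,
            dif_pos ⟨h1, h2, by exact_mod_cast h3⟩]
          by_cases hne : pvG nums1 nums2 (a-1) (b-1) ((c : Int)-1) ≠ pvNEG
          · rw [if_pos ⟨h1, h2, h3, hne⟩, if_pos hne]
          · rw [if_neg (by tauto), if_neg hne]
        · rw [if_neg (fun hx => h3 hx.2.2.1),
            dif_neg (show ¬(0 < a ∧ 0 < b ∧ 0 < (c : Int)) from fun hx => h3 (by exact_mod_cast hx.2.2))]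
      · rw [if_pos h1, if_neg h2, hv1 h1, dif_pos h1, dif_neg h2,
          if_neg (fun hx => h2 hx.2.1), dif_neg (fun hx => h2 hx.2.1)]
      · rw [if_neg h1, if_pos h2, hv2 h2, dif_neg h1, dif_pos h2,
          if_neg (fun hx => h1 hx.1), dif_neg (fun hx => h1 hx.1)]
      · omega
  · rw [if_neg key]
    rw [hg a b c ha hb hc]
    have : pvLt a b c i j (kk+1) ↔ pvLt a b c i j kk := by unfold pvLt; omega
    rw [if_congr this rfl rfl]

theorem pvGetD_set {α : Type} (l : List α) (i j : Nat) (v d : α) :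
    (l.set i v).getD j d = if i = j ∧ i < l.length then v else l.getD j d := by
  by_cases h : i = j ∧ i < l.length
  · obtain ⟨rfl, hl⟩ := h
    rw [if_pos ⟨rfl, hl⟩]
    simp [List.getD_eq_getElem?_getD, List.getElem?_set, hl]
  · rw [if_neg h]
    by_cases hij : i = j
    · obtain rfl := hij
      have hl : ¬ i < l.length := fun hl => h ⟨rfl, hl⟩
      simp [List.getD_eq_getElem?_getD, List.getElem?_set, hl]
    · simp [List.getD_eq_getElem?_getD, List.getElem?_set, hij]

theorem pvGetD_mem {α : Type} (l : List α) (j : Nat) (d : α) (h : j < l.length) : l.getD j d ∈ l := by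
  rw [List.getD_eq_getElem l d h]
  exact List.getElem_mem h

-- the table keeps its (n1+1) × (n2+1) × (kn+1) dimensions
def pvShape (n1 n2 kn : Nat) (dp : List (List (List Int))) : Prop :=
  dp.length = n1 + 1 ∧ ∀ r ∈ dp, r.length = n2 + 1 ∧ ∀ q ∈ r, q.length = kn + 1

theorem pvShape_set3 (n1 n2 kn : Nat) (dp : List (List (List Int))) (a b c : Nat) (v : Int)
    (hsh : pvShape n1 n2 kn dp) (ha : a ≤ n1) (hb : b ≤ n2) :
    pvShape n1 n2 kn (pvSet3 dp a b c v) := by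
  obtain ⟨hlen, hrows⟩ := hsh
  have hrow := hrows _ (pvGetD_mem dp a [] (by omega))
  constructor
  · rw [pvSet3, List.length_set, hlen]
  · intro r hr
    rcases List.mem_or_eq_of_mem_set hr with hmem | rfl
    · exact hrows r hmem
    · refine ⟨by rw [List.length_set]; exact hrow.1, ?_⟩
      intro q hq
      rcases List.mem_or_eq_of_mem_set hq with hmem | rfl
      · exact hrow.2 q hmem
      · rw [List.length_set]
        exact hrow.2 _ (pvGetD_mem _ b [] (by rw [hrow.1]; omega))

theorem pvGet3_set3 (n1 n2 kn : Nat) (dp : List (List (List Int))) (a b c : Nat) (v : Int)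
    (hsh : pvShape n1 n2 kn dp) (ha : a ≤ n1) (hb : b ≤ n2) (hc : c ≤ kn) (x y z : Nat) :
    pvGet3 (pvSet3 dp a b c v) x y z = pvWrite (pvGet3 dp) a b c v x y z := by
  obtain ⟨hlen, hrows⟩ := hsh
  have hrow := hrows _ (pvGetD_mem dp a [] (by omega))
  have hcol := hrow.2 _ (pvGetD_mem _ b [] (by rw [hrow.1]; omega))
  unfold pvGet3 pvSet3 pvWrite
  rw [pvGetD_set]
  by_cases hax : a = x
  · obtain rfl := hax
    rw [if_pos ⟨rfl, by omega⟩, pvGetD_set]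
    by_cases hby : b = y
    · obtain rfl := hby
      rw [if_pos ⟨rfl, by rw [hrow.1]; omega⟩, pvGetD_set]
      by_cases hcz : c = z
      · obtain rfl := hcz
        rw [if_pos ⟨rfl, by rw [hcol]; omega⟩, if_pos ⟨rfl, rfl, rfl⟩]
      · rw [if_neg (fun hx => hcz hx.1), if_neg (fun hx => hcz hx.2.2.symm)]
    · rw [if_neg (fun hx => hby hx.1), if_neg (fun hx => hby hx.2.1.symm)]
  · rw [if_neg (fun hx => hax hx.1), if_neg (fun hx => hax hx.1.symm)]

-- list-table version of the step: one inner-loop body preserves shape and the invariant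
theorem pvStepL (nums1 nums2 : List Int) (n1 n2 kn : Nat) (dp : List (List (List Int)))
    (i j kk : Nat) (hi : i ≤ n1) (hj : j ≤ n2) (hk : kk ≤ kn)
    (hsh : pvShape n1 n2 kn dp) (hg : pvGood nums1 nums2 n1 n2 kn (pvGet3 dp) i j kk) :
    pvShape n1 n2 kn (pvSet3 dp i j kk (pvCell nums1 nums2 (pvGet3 dp) i j kk)) ∧
    pvGood nums1 nums2 n1 n2 kn
      (pvGet3 (pvSet3 dp i j kk (pvCell nums1 nums2 (pvGet3 dp) i j kk))) i j (kk+1) := by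
  refine ⟨pvShape_set3 n1 n2 kn dp i j kk _ hsh hi hj, ?_⟩
  intro a b c ha hb hc
  rw [pvGet3_set3 n1 n2 kn dp i j kk _ hsh hi hj hk]
  exact pvStep nums1 nums2 n1 n2 kn (pvGet3 dp) i j kk hi hj hk hg a b c ha hb hc

theorem pvShift23 (nums1 nums2 : List Int) (n1 n2 kn : Nat) (t : Nat → Nat → Nat → Int)
    (i j : Nat) (hg : pvGood nums1 nums2 n1 n2 kn t i j (kn+1)) :
    pvGood nums1 nums2 n1 n2 kn t i (j+1) 0 := by
  intro a b c ha hb hc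
  rw [hg a b c ha hb hc]
  exact if_congr (by unfold pvLt; omega) rfl rfl

theorem pvShift12 (nums1 nums2 : List Int) (n1 n2 kn : Nat) (t : Nat → Nat → Nat → Int)
    (i : Nat) (hg : pvGood nums1 nums2 n1 n2 kn t i (n2+1) 0) :
    pvGood nums1 nums2 n1 n2 kn t (i+1) 0 0 := by
  intro a b c ha hb hc
  rw [hg a b c ha hb hc]
  exact if_congr (by unfold pvLt; omega) rfl rfl

theorem pvFoldlRangeSucc {α : Type} (f : α → Nat → α) (a : α) (m : Nat) :
    (List.range (m+1)).foldl f a = f ((List.range m).foldl f a) m := by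
  rw [List.range_succ, List.foldl_append, List.foldl_cons, List.foldl_nil]

theorem pvLoop3 (nums1 nums2 : List Int) (n1 n2 kn : Nat) (dp : List (List (List Int)))
    (i j : Nat) (hi : i ≤ n1) (hj : j ≤ n2) :
    ∀ m, m ≤ kn + 1 → pvShape n1 n2 kn dp → pvGood nums1 nums2 n1 n2 kn (pvGet3 dp) i j 0 →
    pvShape n1 n2 kn
      ((List.range m).foldl (fun dp kk => pvSet3 dp i j kk (pvCell nums1 nums2 (pvGet3 dp) i j kk)) dp) ∧
    pvGood nums1 nums2 n1 n2 kn
      (pvGet3 ((List.range m).foldl (fun dp kk => pvSet3 dp i j kk (pvCell nums1 nums2 (pvGet3 dp) i j kk)) dp)) i j m := by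
  intro m
  induction m with
  | zero => intro _ hsh hg; simpa using ⟨hsh, hg⟩
  | succ m ih =>
    intro hm hsh hg
    rw [pvFoldlRangeSucc]
    obtain ⟨hsh', hg'⟩ := ih (by omega) hsh hg
    exact pvStepL nums1 nums2 n1 n2 kn _ i j m hi hj (by omega) hsh' hg'

theorem pvLoop2 (nums1 nums2 : List Int) (n1 n2 kn : Nat) (dp : List (List (List Int)))
    (i : Nat) (hi : i ≤ n1) :
    ∀ m, m ≤ n2 + 1 → pvShape n1 n2 kn dp → pvGood nums1 nums2 n1 n2 kn (pvGet3 dp) i 0 0 →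
    pvShape n1 n2 kn
      ((List.range m).foldl (fun dp j =>
        (List.range (kn+1)).foldl (fun dp kk => pvSet3 dp i j kk (pvCell nums1 nums2 (pvGet3 dp) i j kk)) dp) dp) ∧
    pvGood nums1 nums2 n1 n2 kn
      (pvGet3 ((List.range m).foldl (fun dp j =>
        (List.range (kn+1)).foldl (fun dp kk => pvSet3 dp i j kk (pvCell nums1 nums2 (pvGet3 dp) i j kk)) dp) dp)) i m 0 := by
  intro m
  induction m with
  | zero => intro _ hsh hg; simpa using ⟨hsh, hg⟩
  | succ m ih =>
    intro hm hsh hg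
    rw [pvFoldlRangeSucc]
    obtain ⟨hsh', hg'⟩ := ih (by omega) hsh hg
    obtain ⟨hsh'', hg''⟩ := pvLoop3 nums1 nums2 n1 n2 kn _ i m hi (by omega) (kn+1) le_rfl hsh' hg'
    exact ⟨hsh'', pvShift23 nums1 nums2 n1 n2 kn _ i m hg''⟩

theorem pvLoop1 (nums1 nums2 : List Int) (n1 n2 kn : Nat) (dp : List (List (List Int))) :
    ∀ m, m ≤ n1 + 1 → pvShape n1 n2 kn dp → pvGood nums1 nums2 n1 n2 kn (pvGet3 dp) 0 0 0 →
    pvShape n1 n2 kn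
      ((List.range m).foldl (fun dp i =>
        (List.range (n2+1)).foldl (fun dp j =>
          (List.range (kn+1)).foldl (fun dp kk => pvSet3 dp i j kk (pvCell nums1 nums2 (pvGet3 dp) i j kk)) dp) dp) dp) ∧
    pvGood nums1 nums2 n1 n2 kn
      (pvGet3 ((List.range m).foldl (fun dp i =>
        (List.range (n2+1)).foldl (fun dp j =>
          (List.range (kn+1)).foldl (fun dp kk => pvSet3 dp i j kk (pvCell nums1 nums2 (pvGet3 dp) i j kk)) dp) dp) dp)) m 0 0 := by
  intro m
  induction m with
  | zero => intro _ hsh hg; simpa using ⟨hsh, hg⟩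
  | succ m ih =>
    intro hm hsh hg
    rw [pvFoldlRangeSucc]
    obtain ⟨hsh', hg'⟩ := ih (by omega) hsh hg
    obtain ⟨hsh'', hg''⟩ := pvLoop2 nums1 nums2 n1 n2 kn _ m (by omega) (n2+1) le_rfl hsh' hg'
    exact ⟨hsh'', pvShift12 nums1 nums2 n1 n2 kn _ m hg''⟩

theorem pvGetD_replicate {α : Type} (n i : Nat) (x d : α) (h : i < n) :
    (List.replicate n x).getD i d = x := by
  rw [List.getD_eq_getElem?_getD, List.getElem?_replicate]
  simp [h]

theorem pvA_eq_G (nums1 nums2 : List Int) (k : Int) :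
    maxScoreTopDownDP nums1 nums2 k = pvG nums1 nums2 nums1.length nums2.length (k.toNat : Int) := by
  unfold maxScoreTopDownDP
  dsimp only
  have hsh0 : pvShape nums1.length nums2.length k.toNat
      (List.replicate (nums1.length+1) (List.replicate (nums2.length+1) (List.replicate (k.toNat+1) pvNEG))) := by
    refine ⟨by simp, ?_⟩
    intro r hr
    rw [List.eq_of_mem_replicate hr]
    refine ⟨by simp, ?_⟩
    intro q hq
    rw [List.eq_of_mem_replicate hq]
    simp
  have hget0 : ∀ a b c : Nat, a ≤ nums1.length → b ≤ nums2.length → c ≤ k.toNat →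
      pvGet3 (List.replicate (nums1.length+1) (List.replicate (nums2.length+1) (List.replicate (k.toNat+1) pvNEG))) a b c = pvNEG := by
    intro a b c ha hb hc
    unfold pvGet3
    rw [pvGetD_replicate _ _ _ _ (by omega), pvGetD_replicate _ _ _ _ (by omega), pvGetD_replicate _ _ _ _ (by omega)]
  have hsh1 : pvShape nums1.length nums2.length k.toNat
      (pvSet3 (List.replicate (nums1.length+1) (List.replicate (nums2.length+1) (List.replicate (k.toNat+1) pvNEG))) 0 0 0 0) :=
    pvShape_set3 _ _ _ _ 0 0 0 0 hsh0 (by omega) (by omega)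
  have hg1 : pvGood nums1 nums2 nums1.length nums2.length k.toNat
      (pvGet3 (pvSet3 (List.replicate (nums1.length+1) (List.replicate (nums2.length+1) (List.replicate (k.toNat+1) pvNEG))) 0 0 0 0)) 0 0 0 := by
    intro a b c ha hb hc
    rw [pvGet3_set3 _ _ _ _ 0 0 0 0 hsh0 (by omega) (by omega) (by omega)]
    rw [if_neg (by unfold pvLt; omega)]
    unfold pvWrite pvInit
    by_cases h0 : a = 0 ∧ b = 0 ∧ c = 0
    · obtain ⟨rfl, rfl, rfl⟩ := h0
      rw [if_pos ⟨rfl, rfl, rfl⟩, if_pos ⟨rfl, rfl, rfl⟩]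
    · rw [if_neg h0, if_neg h0, hget0 a b c ha hb hc]
  obtain ⟨_, hgood⟩ := pvLoop1 nums1 nums2 nums1.length nums2.length k.toNat _ (nums1.length + 1) le_rfl hsh1 hg1
  rw [hgood nums1.length nums2.length k.toNat le_rfl le_rfl le_rfl, if_pos (by unfold pvLt; omega)]

-- ===== VERDICT (by name: the statement is the Claim_ definition above) =====
theorem maxScoreTopDownDP_spec : Claim_equal_maxScoreTopDownDP := by
  intro nums1 nums2 k _ hpre
  unfold Spec_maxScoreTopDownDP maxScoreTopDownDP_alt
  have hcoh : pvCoh nums1 nums2 PySem.Dict.empty := by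
    intro i j kk v hv
    simp [PySem.Dict.get?_empty] at hv
  have hb := (pvF_correct nums1 nums2 (nums1.length + nums2.length) nums1.length nums2.length rfl
    k PySem.Dict.empty hcoh).1
  rw [pvA_eq_G, hb, Int.toNat_of_nonneg hpre]
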